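-- pv_equiv track=rewrite | github.com/FabioCannavaro/BackJoon | 백준/Silver/1436. 영화감독 숌/영화감독 숌.py | apocalyptic_number
-- ===== SOURCE A (Python) =====
-- def apocalyptic_number(n):
--     cnt=0
--     num=665
--     while True:
--         num+=1
--         if "666" in str(num):
--             cnt+=1
--             if cnt==n:
--                 return num
-- ===== SOURCE B (Python) =====
-- def _contains(q):
--     # does the decimal representation of q contain "666"? (numeric digit windows)
--     while q >= 666:
--         if q % 1000 == 666:
--             return True
--         q //= 10
--     return False
--
--
-- def _counts(x):
--     # For the numbers 0..x, return the triple (a, b6, b66):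
--     #   a   = how many contain "666"
--     #   b66 = how many do not contain "666" but end in digits "66"
--     #   b6  = how many do not contain "666", end in digit 6, but not in "66"
--     # Computed by recursion over x // 10 (a top-down digit DP), O(digits^2).
--     if x < 10:
--         return (0, 1 if x >= 6 else 0, 0)
--     q, r = divmod(x, 10)
--     a1, b61, b661 = _counts(q - 1)
--     n1 = q - a1 - b61 - b661          # no "666" and last digit != 6, among 0..q-1
--     a = 10 * a1 + b661
--     b66 = b61
--     b6 = n1
--     # partial top block: m = 10*q + t for t = 0..r
--     c_q = _contains(q)
--     m66 = (not c_q) and q % 100 == 66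
--     m6 = (not c_q) and (not m66) and q % 10 == 6
--     if c_q:
--         a += r + 1
--     elif r >= 6:
--         if m66:
--             a += 1
--         elif m6:
--             b66 += 1
--         else:
--             b6 += 1
--     return (a, b6, b66)
--
--
-- def apocalyptic_number(n):
--     # binary search for the least X with count(X) >= n, where
--     # count(X) = _counts(X)[0] = how many numbers <= X contain "666"
--     lo = 665                      # count(665) = 0 < n
--     hi = 666 + 1000 * (n - 1)     # 666+1000k for k < n all contain "666", so count(hi) >= n
--     while lo + 1 < hi:
--         mid = (lo + hi) // 2
--         if _counts(mid)[0] >= n: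
--             hi = mid
--         else:
--             lo = mid
--     return hi
-- ===== Notes on version B (the rewrite author's own statement) =====
-- stated objective: faster
-- what changed: A scans every integer from 666 upward and string-tests each for '666'; B computes how many numbers <= x contain '666' with a recursive digit-DP over x//10 (tracking contains / ends-in-6 / ends-in-66 classes) and binary-searches for the least x whose count reaches n.
-- outside the precondition, e.g. on apocalyptic_number(0): A does not finish within the time limit, B returns -334
import Mathlib
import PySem

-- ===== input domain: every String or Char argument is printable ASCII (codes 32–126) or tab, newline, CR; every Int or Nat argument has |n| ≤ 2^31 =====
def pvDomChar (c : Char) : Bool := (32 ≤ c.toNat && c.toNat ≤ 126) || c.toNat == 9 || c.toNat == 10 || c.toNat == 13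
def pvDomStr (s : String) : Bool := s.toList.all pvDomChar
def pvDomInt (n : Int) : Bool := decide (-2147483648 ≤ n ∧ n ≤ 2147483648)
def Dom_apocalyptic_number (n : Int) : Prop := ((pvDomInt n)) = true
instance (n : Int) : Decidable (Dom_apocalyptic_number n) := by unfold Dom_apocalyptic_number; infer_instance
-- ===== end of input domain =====

-- B replaces A's linear scan from 666 upward by a binary search driven by a
-- top-down digit-DP count of the numbers containing "666"; equality of the
-- return values is proved for every n with 1 ≤ n (Pre_; for n ≤ 0 A never returns).
-- Every loop is ported with a fuel parameter that provably never runs out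
-- (A's 'while True' needs at most 1000*n steps; B's loops at most their fuel).

-- ===== PORT A =====
-- A's 'while True' loop
def apocStep (n cnt num : Int) (fuel : Nat) : Int :=
  match fuel with
  | 0 => 0
  | fuel + 1 =>
    let num' := num + 1
    if PySem.Str.isIn "666" (PySem.Int.toStr num') then
      if cnt + 1 == n then num' else apocStep n (cnt + 1) num' fuel
    else apocStep n cnt num' fuel

def apocalyptic_number (n : Int) : Int := apocStep n 0 665 (1000 * n.toNat)

-- ===== PORT B =====
-- port of Source B's _contains (numeric digit-window test for "666"); fuel q.toNat+1 covers the q //= 10 loop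
def containsLoop (fuel : Nat) (q : Int) : Bool :=
  match fuel with
  | 0 => false
  | fuel + 1 =>
    if 666 ≤ q then
      if PySem.Int.mod q 1000 == 666 then true
      else containsLoop fuel (PySem.Int.floordiv q 10)
    else false

def containsB (q : Int) : Bool := containsLoop (q.toNat + 1) q

-- port of Source B's _counts: the triple (a, b6, b66) for the numbers 0..x; fuel x.toNat+1 covers the x//10-1 recursion
def countsLoop2 (fuel : Nat) (x : Int) : Int × Int × Int :=
  match fuel with
  | 0 => (0, 0, 0)
  | fuel + 1 =>
    if x < 10 then (0, if 6 ≤ x then 1 else 0, 0)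
    else
      let q := PySem.Int.floordiv x 10
      let r := PySem.Int.mod x 10
      let t := countsLoop2 fuel (q - 1)
      let a1 := t.1
      let b61 := t.2.1
      let b661 := t.2.2
      let n1 := q - a1 - b61 - b661
      let a := 10 * a1 + b661
      let b66 := b61
      let b6 := n1
      let cq := containsB q
      let m66 := !cq && (PySem.Int.mod q 100 == 66)
      let m6 := !cq && !m66 && (PySem.Int.mod q 10 == 6)
      if cq then (a + r + 1, b6, b66)
      else if 6 ≤ r then
        if m66 then (a + 1, b6, b66)
        else if m6 then (a, b6, b66 + 1)
        else (a, b6 + 1, b66)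
      else (a, b6, b66)

def countsB (x : Int) : Int × Int × Int := countsLoop2 (x.toNat + 1) x

-- port of Source B's binary-search loop; fuel (hi-lo).toNat covers the interval halving
def bsearchLoop (n : Int) (fuel : Nat) (lo hi : Int) : Int :=
  match fuel with
  | 0 => hi
  | fuel + 1 =>
    if lo + 1 < hi then
      let mid := PySem.Int.floordiv (lo + hi) 2
      if n ≤ (countsB mid).1 then bsearchLoop n fuel lo mid else bsearchLoop n fuel mid hi
    else hi

def bsearchB (n lo hi : Int) : Int := bsearchLoop n (hi - lo).toNat lo hi

def apocalyptic_number_alt (n : Int) : Int := bsearchB n 665 (666 + 1000 * (n - 1))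

-- ===== PRECONDITION & SPEC =====
-- Pre_ excludes exactly n ≤ 0: on those inputs A's 'while True' loop never
-- returns (cnt only counts upward, so cnt == n is never reached).
def Pre_apocalyptic_number (n : Int) : Prop := 1 ≤ n
instance (n : Int) : Decidable (Pre_apocalyptic_number n) := by
  unfold Pre_apocalyptic_number; infer_instance

def pvWitness_apocalyptic_number : Int := 2

def Spec_apocalyptic_number (n : Int) (out : Int) : Prop := out = apocalyptic_number_alt n
instance (n : Int) (out : Int) : Decidable (Spec_apocalyptic_number n out) := by
  unfold Spec_apocalyptic_number; infer_instance

-- ===== CLAIM (what is proved, stated in full; the proofs are below) =====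
def Claim_equal_apocalyptic_number : Prop :=
  ∀ (n : Int), Dom_apocalyptic_number n → Pre_apocalyptic_number n →
    Spec_apocalyptic_number n (apocalyptic_number n)

-- ===== LEMMAS AND PROOFS =====
theorem pvTermDiv10 (q : Int) (h : 666 ≤ q) : (PySem.Int.floordiv q 10).toNat < q.toNat := by
  rw [PySem.Int.floordiv_eq_ediv_of_pos (by norm_num : (0:Int) < 10)]
  omega

theorem pvTermCounts (x : Int) (h : ¬ x < 10) : (PySem.Int.floordiv x 10 - 1).toNat < x.toNat := by
  rw [PySem.Int.floordiv_eq_ediv_of_pos (by norm_num : (0:Int) < 10)]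
  omega

theorem pvTermMid1 (lo hi : Int) (h : lo + 1 < hi) :
    (PySem.Int.floordiv (lo + hi) 2 - lo).toNat < (hi - lo).toNat := by
  rw [PySem.Int.floordiv_eq_ediv_of_pos (by norm_num : (0:Int) < 2)]
  omega

theorem pvTermMid2 (lo hi : Int) (h : lo + 1 < hi) :
    (hi - PySem.Int.floordiv (lo + hi) 2).toNat < (hi - lo).toNat := by
  rw [PySem.Int.floordiv_eq_ediv_of_pos (by norm_num : (0:Int) < 2)]
  omega

lemma containsLoop_fuel : ∀ (f : Nat) (g : Nat) (q : Int), q.toNat < f → q.toNat < g →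
    containsLoop f q = containsLoop g q := by
  intro f
  induction f with
  | zero => omega
  | succ f ih =>
    intro g q hf hg
    match g, hg with
    | g + 1, hg =>
      show containsLoop (f + 1) q = containsLoop (g + 1) q
      rw [containsLoop, containsLoop]
      by_cases h6 : 666 ≤ q
      · rw [if_pos h6, if_pos h6]
        by_cases hm : (PySem.Int.mod q 1000 == 666) = true
        · rw [if_pos hm, if_pos hm]
        · rw [if_neg hm, if_neg hm]
          have hlt := pvTermDiv10 q h6
          exact ih g _ (by omega) (by omega)
      · rw [if_neg h6, if_neg h6]

lemma containsB_eq (q : Int) : containsB q =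
    (if 666 ≤ q then
      (if PySem.Int.mod q 1000 == 666 then true
       else containsB (PySem.Int.floordiv q 10))
     else false) := by
  show containsLoop (q.toNat + 1) q = _
  rw [containsLoop]
  by_cases h6 : 666 ≤ q
  · rw [if_pos h6, if_pos h6]
    by_cases hm : (PySem.Int.mod q 1000 == 666) = true
    · rw [if_pos hm, if_pos hm]
    · rw [if_neg hm, if_neg hm]
      have hlt := pvTermDiv10 q h6
      exact containsLoop_fuel q.toNat _ _ (by omega) (by omega)
  · rw [if_neg h6, if_neg h6]

lemma containsB_neg {q : Int} (h : q < 666) : containsB q = false := by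
  rw [containsB_eq]
  simp [show ¬ 666 ≤ q by omega]

lemma containsB_pos {q : Int} (h : 666 ≤ q) :
    containsB q = ((PySem.Int.mod q 1000 == 666) || containsB (PySem.Int.floordiv q 10)) := by
  rw [containsB_eq]
  simp only [if_pos h]
  cases hm : (PySem.Int.mod q 1000 == 666) <;> simp [hm]

def paN (m : Nat) : Bool := containsB (m : Int)

def p66N (m : Nat) : Bool := !paN m && (m % 100 == 66)

def p6N (m : Nat) : Bool := !paN m && (m % 10 == 6) && (m % 100 != 66)

def pnN (m : Nat) : Bool := !paN m && (m % 10 != 6)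

lemma paN_lt {m : Nat} (h : m < 666) : paN m = false := by
  unfold paN
  exact containsB_neg (by omega)

lemma paN_pos {m : Nat} (h : 666 ≤ m) : paN m = ((m % 1000 == 666) || paN (m / 10)) := by
  unfold paN
  rw [containsB_pos (by exact_mod_cast h)]
  have h1 : PySem.Int.mod (m:Int) 1000 = ((m % 1000 : Nat) : Int) := by
    exact_mod_cast PySem.Int.mod_natCast m 1000
  have h2 : PySem.Int.floordiv (m:Int) 10 = ((m/10 : Nat) : Int) := by
    exact_mod_cast PySem.Int.floordiv_natCast m 10
  rw [h1, h2]
  congr 1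
  rw [beq_eq_decide, beq_eq_decide, decide_eq_decide]
  omega

lemma paN_step (q r : Nat) (hr : r < 10) :
    paN (10 * q + r) = (paN q || ((q % 100 == 66) && (r == 6))) := by
  by_cases h : 10 * q + r < 666
  · rw [paN_lt h, paN_lt (show q < 666 by omega), Bool.eq_iff_iff]
    have hp : True := trivial
    simp only [hp, Bool.not_true, Bool.not_false, Bool.false_and, Bool.true_and, Bool.and_eq_true, Bool.or_eq_true, Bool.false_or, Bool.true_or, Bool.and_true, Bool.and_false, Bool.or_true, Bool.or_false, beq_iff_eq, bne_iff_ne, ne_eq, Bool.and_eq_false_iff, Bool.or_eq_false_iff, beq_eq_false_iff_ne, bne_eq_false_iff_eq, decide_eq_true_eq, decide_eq_false_iff_not, Bool.not_eq_true', Bool.true_eq_false, Bool.false_eq_true, iff_false, iff_true, false_iff, true_iff, not_and, not_or, not_false_iff, not_true] <;> omega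
  · rw [not_lt] at h
    rw [paN_pos h]
    have hq : (10 * q + r) / 10 = q := by omega
    rw [hq, Bool.eq_iff_iff]
    cases hp : paN q <;> simp only [hp, Bool.not_true, Bool.not_false, Bool.false_and, Bool.true_and, Bool.and_eq_true, Bool.or_eq_true, Bool.false_or, Bool.true_or, Bool.and_true, Bool.and_false, Bool.or_true, Bool.or_false, beq_iff_eq, bne_iff_ne, ne_eq, Bool.and_eq_false_iff, Bool.or_eq_false_iff, beq_eq_false_iff_ne, bne_eq_false_iff_eq, decide_eq_true_eq, decide_eq_false_iff_not, Bool.not_eq_true', Bool.true_eq_false, Bool.false_eq_true, iff_false, iff_true, false_iff, true_iff, not_and, not_or, not_false_iff, not_true] <;> omega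

lemma p66N_step (q r : Nat) (hr : r < 10) : p66N (10 * q + r) = (p6N q && (r == 6)) := by
  unfold p66N p6N
  rw [paN_step q r hr, Bool.eq_iff_iff]
  cases hp : paN q <;> simp only [hp, Bool.not_true, Bool.not_false, Bool.false_and, Bool.true_and, Bool.and_eq_true, Bool.or_eq_true, Bool.false_or, Bool.true_or, Bool.and_true, Bool.and_false, Bool.or_true, Bool.or_false, beq_iff_eq, bne_iff_ne, ne_eq, Bool.and_eq_false_iff, Bool.or_eq_false_iff, beq_eq_false_iff_ne, bne_eq_false_iff_eq, decide_eq_true_eq, decide_eq_false_iff_not, Bool.not_eq_true', Bool.true_eq_false, Bool.false_eq_true, iff_false, iff_true, false_iff, true_iff, not_and, not_or, not_false_iff, not_true] <;> omega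

lemma p6N_step (q r : Nat) (hr : r < 10) : p6N (10 * q + r) = (pnN q && (r == 6)) := by
  unfold p6N pnN
  rw [paN_step q r hr, Bool.eq_iff_iff]
  cases hp : paN q <;> simp only [hp, Bool.not_true, Bool.not_false, Bool.false_and, Bool.true_and, Bool.and_eq_true, Bool.or_eq_true, Bool.false_or, Bool.true_or, Bool.and_true, Bool.and_false, Bool.or_true, Bool.or_false, beq_iff_eq, bne_iff_ne, ne_eq, Bool.and_eq_false_iff, Bool.or_eq_false_iff, beq_eq_false_iff_ne, bne_eq_false_iff_eq, decide_eq_true_eq, decide_eq_false_iff_not, Bool.not_eq_true', Bool.true_eq_false, Bool.false_eq_true, iff_false, iff_true, false_iff, true_iff, not_and, not_or, not_false_iff, not_true] <;> omega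

def iB (b : Bool) : Int := if b then 1 else 0

def sumI (p : Nat → Bool) (N : Nat) : Int := ((List.range N).map (fun m => iB (p m))).sum

lemma sumI_succ (p : Nat → Bool) (N : Nat) : sumI p (N + 1) = sumI p N + iB (p N) := by
  simp [sumI, List.range_succ]

lemma sumI_add (p : Nat → Bool) (M K : Nat) :
    sumI p (M + K) = sumI p M + ((List.range K).map (fun t => iB (p (M + t)))).sum := by
  simp [sumI, List.range_add, Function.comp_def]

lemma sumI_congr {p q : Nat → Bool} (N : Nat) (h : ∀ m < N, p m = q m) :
    sumI p N = sumI q N := by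
  unfold sumI
  congr 1
  refine List.map_congr_left ?_
  intro m hm
  rw [h m (List.mem_range.mp hm)]

lemma sumI_false {p : Nat → Bool} (N : Nat) (h : ∀ m < N, p m = false) : sumI p N = 0 := by
  refine List.sum_eq_zero ?_
  intro x hx
  simp only [List.mem_map, List.mem_range] at hx
  obtain ⟨m, hm, rfl⟩ := hx
  simp [h m hm, iB]

lemma sumI_true {p : Nat → Bool} (N : Nat) (h : ∀ m < N, p m = true) : sumI p N = N := by
  unfold sumI
  have he : (List.range N).map (fun m => iB (p m)) = (List.range N).map (fun _ => (1 : Int)) := by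
    refine List.map_congr_left ?_
    intro m hm
    simp [h m (List.mem_range.mp hm), iB]
  rw [he, PySem.List.sum_map_const_int]
  simp

lemma sumI_ind (k N : Nat) : sumI (fun m => m == k) N = if k < N then 1 else 0 := by
  induction N with
  | zero => simp [sumI]
  | succ N ih =>
    rw [sumI_succ, ih]
    by_cases h : N = k
    · subst h
      simp [iB]
    · have hb : ¬ (N == k) = true := by simp [h]
      rcases Nat.lt_or_ge k N with h' | h'
      · simp [iB, h', Nat.lt_succ_of_lt h', h]
      · have h2 : ¬ k < N := by omega
        have h3 : ¬ k < N + 1 := by omega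
        simp [iB, h2, h3, h]

lemma part_point (m : Nat) : iB (paN m) + iB (p6N m) + iB (p66N m) + iB (pnN m) = 1 := by
  unfold p6N p66N pnN iB
  cases hp : paN m <;> cases h6 : (m % 10 == 6) <;> cases h66 : (m % 100 == 66) <;>
    simp only [beq_iff_eq, beq_eq_false_iff_ne, bne_iff_ne, bne_eq_false_iff_eq, ne_eq] at h6 h66 <;>
    simp [h6, h66] <;> omega

lemma partition_sum (N : Nat) :
    sumI paN N + sumI p6N N + sumI p66N N + sumI pnN N = N := by
  induction N with
  | zero => simp [sumI]
  | succ N ih =>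
    rw [sumI_succ, sumI_succ, sumI_succ, sumI_succ]
    have hp := part_point N
    push_cast
    linarith

lemma blockA (q : Nat) :
    ((List.range 10).map (fun r => iB (paN (10 * q + r)))).sum
      = 10 * iB (paN q) + iB (p66N q) := by
  rw [show ((List.range 10).map (fun r => iB (paN (10 * q + r)))).sum
        = sumI (fun r => paN (10 * q + r)) 10 from rfl]
  rw [sumI_congr 10 (fun m hm => paN_step q m hm)]
  cases hp : paN q
  · cases h66 : (q % 100 == 66)
    · rw [sumI_false 10 (fun m _ => by simp)]
      simp [iB, p66N, hp, h66]
    · rw [sumI_congr 10 (fun m _ => by simp : ∀ m < 10, (false || ((true:Bool) && (m == 6))) = (m == 6))]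
      rw [sumI_ind]
      simp [iB, p66N, hp, h66]
  · rw [sumI_true 10 (fun m _ => by simp)]
    simp [iB, p66N, hp]

lemma block66 (q : Nat) :
    ((List.range 10).map (fun r => iB (p66N (10 * q + r)))).sum = iB (p6N q) := by
  rw [show ((List.range 10).map (fun r => iB (p66N (10 * q + r)))).sum
        = sumI (fun r => p66N (10 * q + r)) 10 from rfl]
  rw [sumI_congr 10 (fun m hm => p66N_step q m hm)]
  cases hp : p6N q
  · rw [sumI_false 10 (fun m _ => by simp)]
    simp [iB]
  · rw [sumI_congr 10 (fun m _ => by simp : ∀ m < 10, ((true:Bool) && (m == 6)) = (m == 6))]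
    rw [sumI_ind]
    simp [iB]

lemma block6 (q : Nat) :
    ((List.range 10).map (fun r => iB (p6N (10 * q + r)))).sum = iB (pnN q) := by
  rw [show ((List.range 10).map (fun r => iB (p6N (10 * q + r)))).sum
        = sumI (fun r => p6N (10 * q + r)) 10 from rfl]
  rw [sumI_congr 10 (fun m hm => p6N_step q m hm)]
  cases hp : pnN q
  · rw [sumI_false 10 (fun m _ => by simp)]
    simp [iB]
  · rw [sumI_congr 10 (fun m _ => by simp : ∀ m < 10, ((true:Bool) && (m == 6)) = (m == 6))]
    rw [sumI_ind]
    simp [iB]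

lemma SA_ten (q : Nat) : sumI paN (10 * q) = 10 * sumI paN q + sumI p66N q := by
  induction q with
  | zero => simp [sumI]
  | succ q ih =>
    have h10 : 10 * (q + 1) = 10 * q + 10 := by ring
    rw [h10, sumI_add, sumI_succ, sumI_succ, blockA, ih]
    ring

lemma S66_ten (q : Nat) : sumI p66N (10 * q) = sumI p6N q := by
  induction q with
  | zero => simp [sumI]
  | succ q ih =>
    have h10 : 10 * (q + 1) = 10 * q + 10 := by ring
    rw [h10, sumI_add, sumI_succ, block66, ih]

lemma S6_ten (q : Nat) : sumI p6N (10 * q) = sumI pnN q := by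
  induction q with
  | zero => simp [sumI]
  | succ q ih =>
    have h10 : 10 * (q + 1) = 10 * q + 10 := by ring
    rw [h10, sumI_add, sumI_succ, block6, ih]

lemma partA (q r : Nat) (hr : r < 10) :
    ((List.range (r + 1)).map (fun t => iB (paN (10 * q + t)))).sum
      = if paN q then (r : Int) + 1 else if p66N q && decide (6 ≤ r) then 1 else 0 := by
  rw [show ((List.range (r + 1)).map (fun t => iB (paN (10 * q + t)))).sum
        = sumI (fun t => paN (10 * q + t)) (r + 1) from rfl]
  rw [sumI_congr (r + 1) (fun m hm => paN_step q m (by omega))]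
  cases hp : paN q
  · cases h66 : (q % 100 == 66)
    · rw [sumI_false (r + 1) (fun m _ => by simp)]
      simp [p66N, hp, h66]
    · rw [sumI_congr (r + 1) (fun m _ => by simp : ∀ m < r + 1, (false || ((true:Bool) && (m == 6))) = (m == 6))]
      rw [sumI_ind]
      by_cases h6 : 6 ≤ r
      · simp [p66N, hp, h66, h6, show 6 < r + 1 by omega]
      · simp [p66N, hp, h66, h6, show ¬ 6 < r + 1 by omega]
  · rw [sumI_true (r + 1) (fun m _ => by simp)]
    push_cast
    simp

lemma part66 (q r : Nat) (hr : r < 10) :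
    ((List.range (r + 1)).map (fun t => iB (p66N (10 * q + t)))).sum
      = if p6N q && decide (6 ≤ r) then 1 else 0 := by
  rw [show ((List.range (r + 1)).map (fun t => iB (p66N (10 * q + t)))).sum
        = sumI (fun t => p66N (10 * q + t)) (r + 1) from rfl]
  rw [sumI_congr (r + 1) (fun m hm => p66N_step q m (by omega))]
  cases hp : p6N q
  · rw [sumI_false (r + 1) (fun m _ => by simp)]
    simp
  · rw [sumI_congr (r + 1) (fun m _ => by simp : ∀ m < r + 1, ((true:Bool) && (m == 6)) = (m == 6))]
    rw [sumI_ind]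
    by_cases h6 : 6 ≤ r
    · simp [h6, show 6 < r + 1 by omega]
    · simp [h6, show ¬ 6 < r + 1 by omega]

lemma part6 (q r : Nat) (hr : r < 10) :
    ((List.range (r + 1)).map (fun t => iB (p6N (10 * q + t)))).sum
      = if pnN q && decide (6 ≤ r) then 1 else 0 := by
  rw [show ((List.range (r + 1)).map (fun t => iB (p6N (10 * q + t)))).sum
        = sumI (fun t => p6N (10 * q + t)) (r + 1) from rfl]
  rw [sumI_congr (r + 1) (fun m hm => p6N_step q m (by omega))]
  cases hp : pnN q
  · rw [sumI_false (r + 1) (fun m _ => by simp)]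
    simp
  · rw [sumI_congr (r + 1) (fun m _ => by simp : ∀ m < r + 1, ((true:Bool) && (m == 6)) = (m == 6))]
    rw [sumI_ind]
    by_cases h6 : 6 ≤ r
    · simp [h6, show 6 < r + 1 by omega]
    · simp [h6, show ¬ 6 < r + 1 by omega]

lemma countsLoop2_fuel : ∀ (f : Nat) (g : Nat) (x : Int), x.toNat < f → x.toNat < g →
    countsLoop2 f x = countsLoop2 g x := by
  intro f
  induction f with
  | zero => omega
  | succ f ih =>
    intro g x hf hg
    match g, hg with
    | g + 1, hg =>
      show countsLoop2 (f + 1) x = countsLoop2 (g + 1) x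
      rw [countsLoop2, countsLoop2]
      by_cases h10 : x < 10
      · rw [if_pos h10, if_pos h10]
      · rw [if_neg h10, if_neg h10]
        have hlt := pvTermCounts x h10
        have hrec : countsLoop2 f (PySem.Int.floordiv x 10 - 1)
            = countsLoop2 g (PySem.Int.floordiv x 10 - 1) :=
          ih g _ (by omega) (by omega)
        simp only [hrec]

lemma countsB_eq (x : Int) : countsB x =
    (if x < 10 then ((0 : Int), if 6 ≤ x then (1 : Int) else 0, (0 : Int))
     else
      let q := PySem.Int.floordiv x 10
      let r := PySem.Int.mod x 10
      let t := countsB (q - 1)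
      let a1 := t.1
      let b61 := t.2.1
      let b661 := t.2.2
      let n1 := q - a1 - b61 - b661
      let a := 10 * a1 + b661
      let b66 := b61
      let b6 := n1
      let cq := containsB q
      let m66 := !cq && (PySem.Int.mod q 100 == 66)
      let m6 := !cq && !m66 && (PySem.Int.mod q 10 == 6)
      if cq then (a + r + 1, b6, b66)
      else if 6 ≤ r then
        if m66 then (a + 1, b6, b66)
        else if m6 then (a, b6, b66 + 1)
        else (a, b6 + 1, b66)
      else (a, b6, b66)) := by
  show countsLoop2 (x.toNat + 1) x = _
  rw [countsLoop2]
  by_cases h10 : x < 10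
  · rw [if_pos h10, if_pos h10]
  · rw [if_neg h10, if_neg h10]
    have hlt := pvTermCounts x h10
    have hrec : countsLoop2 x.toNat (PySem.Int.floordiv x 10 - 1)
        = countsLoop2 ((PySem.Int.floordiv x 10 - 1).toNat + 1) (PySem.Int.floordiv x 10 - 1) :=
      countsLoop2_fuel _ _ _ (by omega) (by omega)
    simp only [hrec, countsB]

lemma m6_eq (m : Nat) : (!paN m && !(p66N m) && (m % 10 == 6)) = p6N m := by
  unfold p66N p6N
  cases hp : paN m <;> cases h66 : (m % 100 == 66) <;> cases h6 : (m % 10 == 6) <;> simp_all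

lemma countsB_correct (x : Nat) :
    countsB (x : Int) = (sumI paN (x + 1), sumI p6N (x + 1), sumI p66N (x + 1)) := by
  induction x using Nat.strong_induction_on with
  | _ x ih =>
  rw [countsB_eq]
  by_cases h : x < 10
  · rw [if_pos (show (x:Int) < 10 by exact_mod_cast h)]
    have hA : sumI paN (x+1) = 0 := sumI_false _ (fun m hm => paN_lt (by omega))
    have h66 : sumI p66N (x+1) = 0 := sumI_false _ (fun m hm => by
      have h2 : (m % 100 == 66) = false := by
        rw [beq_eq_false_iff_ne]
        omega
      simp [p66N, h2])
    have hS6 : sumI p6N (x+1) = if 6 ≤ (x:Int) then 1 else 0 := by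
      rw [sumI_congr (x+1) (fun m hm => ?_), sumI_ind 6 (x+1)]
      · by_cases hx : 6 ≤ x
        · simp [show 6 < x + 1 by omega, show (6:Int) ≤ (x:Int) by exact_mod_cast hx]
        · simp [show ¬ 6 < x + 1 by omega, show ¬ (6:Int) ≤ (x:Int) by exact_mod_cast hx]
      · have hp := paN_lt (show m < 666 by omega)
        have hm10 : m % 10 = m := Nat.mod_eq_of_lt (by omega)
        have hm100 : (m % 100 != 66) = true := by
          rw [bne_iff_ne]
          omega
        simp [p6N, hp, hm10, hm100]
    rw [hA, h66, hS6]
  · rw [if_neg (show ¬ (x:Int) < 10 by exact_mod_cast h)]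
    have hq : PySem.Int.floordiv (x:Int) 10 = ((x/10 : Nat) : Int) := by
      exact_mod_cast PySem.Int.floordiv_natCast x 10
    have hr : PySem.Int.mod (x:Int) 10 = ((x % 10 : Nat) : Int) := by
      exact_mod_cast PySem.Int.mod_natCast x 10
    have hq1 : ((x/10 : Nat) : Int) - 1 = ((x/10 - 1 : Nat) : Int) := by
      have h1 : 1 ≤ x / 10 := by omega
      push_cast [h1]
      ring
    have hih := ih (x/10 - 1) (by omega)
    have hqq : x / 10 - 1 + 1 = x / 10 := by omega
    rw [hqq] at hih
    have hm100 : (PySem.Int.mod ((x/10 : Nat) : Int) 100 == 66) = ((x/10) % 100 == 66) := by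
      rw [show PySem.Int.mod ((x/10 : Nat) : Int) 100 = (((x/10) % 100 : Nat) : Int) by
        exact_mod_cast PySem.Int.mod_natCast (x/10) 100]
      rw [beq_eq_decide, beq_eq_decide, decide_eq_decide]
      omega
    have hm10 : (PySem.Int.mod ((x/10 : Nat) : Int) 10 == 6) = ((x/10) % 10 == 6) := by
      rw [show PySem.Int.mod ((x/10 : Nat) : Int) 10 = (((x/10) % 10 : Nat) : Int) by
        exact_mod_cast PySem.Int.mod_natCast (x/10) 10]
      rw [beq_eq_decide, beq_eq_decide, decide_eq_decide]
      omega
    have hcq : containsB ((x/10 : Nat) : Int) = paN (x/10) := rfl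
    have hx1 : x + 1 = 10*(x/10) + (x%10 + 1) := by omega
    have eA : sumI paN (x+1) = 10 * sumI paN (x/10) + sumI p66N (x/10)
        + (if paN (x/10) then ((x % 10 : Nat) : Int) + 1
           else if p66N (x/10) && decide (6 ≤ x % 10) then 1 else 0) := by
      rw [hx1, sumI_add, SA_ten, partA _ _ (by omega)]
    have e66 : sumI p66N (x+1) = sumI p6N (x/10)
        + (if p6N (x/10) && decide (6 ≤ x % 10) then 1 else 0) := by
      rw [hx1, sumI_add, S66_ten, part66 _ _ (by omega)]
    have e6 : sumI p6N (x+1) = sumI pnN (x/10)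
        + (if pnN (x/10) && decide (6 ≤ x % 10) then 1 else 0) := by
      rw [hx1, sumI_add, S6_ten, part6 _ _ (by omega)]
    have epn : sumI pnN (x/10) = ((x/10 : Nat) : Int) - sumI paN (x/10) - sumI p6N (x/10) - sumI p66N (x/10) := by
      have hps := partition_sum (x/10)
      linarith
    simp only [hq, hr, hq1, hih, hcq, hm100, hm10]
    rw [eA, e66, e6, epn]
    rw [show (!paN (x/10) && ((x/10) % 100 == 66)) = p66N (x/10) from rfl]
    rw [m6_eq (x/10)]
    cases hc : paN (x/10)
    · cases h66b : p66N (x/10)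
      · cases hp6b : p6N (x/10)
        · have hpn : pnN (x/10) = true := by
            have hpart := part_point (x/10)
            rw [hc, h66b, hp6b] at hpart
            cases hpnc : pnN (x/10)
            · rw [hpnc] at hpart
              simp [iB] at hpart
            · rfl
          by_cases h6 : 6 ≤ x % 10
          · have h6' : (6:Int) ≤ ((x % 10 : Nat) : Int) := by exact_mod_cast h6
            simp only [h66b, hp6b, hpn, h6, h6', decide_true, Bool.and_true, Bool.false_eq_true,
              if_false, if_true, Bool.true_eq_false, if_pos, if_neg, Bool.false_and, Bool.and_false,
              Bool.true_and, Bool.and_self, ite_true, ite_false, decide_eq_true_eq]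
            try simp only [Prod.mk.injEq]
            try refine ⟨?_, ?_, ?_⟩
            all_goals first | trivial | ring
          · have h6' : ¬ (6:Int) ≤ ((x % 10 : Nat) : Int) := by exact_mod_cast h6
            simp only [h66b, hp6b, hpn, h6, h6', decide_false, Bool.and_false, Bool.false_eq_true,
              Bool.true_eq_false, Bool.false_and, Bool.true_and, ite_true, ite_false, if_neg,
              decide_eq_true_eq]
            try simp only [Prod.mk.injEq]
            try refine ⟨?_, ?_, ?_⟩
            all_goals first | trivial | ring
        · have hpn : pnN (x/10) = false := by
            have hp6' : ((x/10) % 10 == 6) = true := by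
              unfold p6N at hp6b
              cases hx6 : ((x/10) % 10 == 6)
              · rw [hc, hx6] at hp6b
                simp at hp6b
              · rfl
            unfold pnN
            simp [show ((x/10) % 10 != 6) = false by
              rw [bne_eq_false_iff_eq]; exact beq_iff_eq.mp hp6']
          by_cases h6 : 6 ≤ x % 10
          · have h6' : (6:Int) ≤ ((x % 10 : Nat) : Int) := by exact_mod_cast h6
            simp only [h66b, hp6b, hpn, h6, h6', decide_true, Bool.and_true, Bool.false_eq_true,
              Bool.true_eq_false, Bool.false_and, Bool.true_and, ite_true, ite_false, if_pos, if_neg,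
              decide_eq_true_eq]
            try simp only [Prod.mk.injEq]
            try refine ⟨?_, ?_, ?_⟩
            all_goals first | trivial | ring
          · have h6' : ¬ (6:Int) ≤ ((x % 10 : Nat) : Int) := by exact_mod_cast h6
            simp only [h66b, hp6b, hpn, h6, h6', decide_false, Bool.and_false, Bool.false_eq_true,
              Bool.true_eq_false, Bool.false_and, Bool.true_and, ite_true, ite_false, if_neg,
              decide_eq_true_eq]
            try simp only [Prod.mk.injEq]
            try refine ⟨?_, ?_, ?_⟩
            all_goals first | trivial | ring
      · have hM : (x/10) % 100 = 66 := by
          unfold p66N at h66b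
          rw [hc] at h66b
          simp at h66b
          exact h66b
        have hp6b : p6N (x/10) = false := by
          unfold p6N
          simp [show ((x/10) % 100 != 66) = false by rw [bne_eq_false_iff_eq]; exact hM]
        have hpn : pnN (x/10) = false := by
          unfold pnN
          simp [show ((x/10) % 10 != 6) = false by rw [bne_eq_false_iff_eq]; omega]
        by_cases h6 : 6 ≤ x % 10
        · have h6' : (6:Int) ≤ ((x % 10 : Nat) : Int) := by exact_mod_cast h6
          simp only [h66b, hp6b, hpn, h6, h6', decide_true, Bool.and_true, Bool.false_eq_true,
            Bool.true_eq_false, Bool.false_and, Bool.true_and, ite_true, ite_false, if_pos, if_neg,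
            decide_eq_true_eq]
          try simp only [Prod.mk.injEq]
          try refine ⟨?_, ?_, ?_⟩
          all_goals first | trivial | ring
        · have h6' : ¬ (6:Int) ≤ ((x % 10 : Nat) : Int) := by exact_mod_cast h6
          simp only [h66b, hp6b, hpn, h6, h6', decide_false, Bool.and_false, Bool.false_eq_true,
            Bool.true_eq_false, Bool.false_and, Bool.true_and, ite_true, ite_false, if_neg,
            decide_eq_true_eq]
          try simp only [Prod.mk.injEq]
          try refine ⟨?_, ?_, ?_⟩
          all_goals first | trivial | ring
    · have h66b : p66N (x/10) = false := by simp [p66N, hc]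
      have hp6b : p6N (x/10) = false := by simp [p6N, hc]
      have hpn : pnN (x/10) = false := by simp [pnN, hc]
      simp only [h66b, hp6b, hpn, Bool.false_and, Bool.and_false, ite_true, ite_false,
        Bool.false_eq_true, Bool.true_eq_false, if_pos, if_neg]
      try simp only [Prod.mk.injEq]
      try refine ⟨?_, ?_, ?_⟩
      all_goals first | trivial | ring

def digR (m : Nat) : List Char :=
  if _h : m < 10 then [Nat.digitChar m] else Nat.digitChar (m % 10) :: digR (m / 10)
termination_by m
decreasing_by omega

lemma digR_lt {m : Nat} (h : m < 10) : digR m = [Nat.digitChar m] := by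
  rw [digR.eq_def, dif_pos h]

lemma digR_ge {m : Nat} (h : 10 ≤ m) : digR m = Nat.digitChar (m % 10) :: digR (m / 10) := by
  rw [digR.eq_def, dif_neg (by omega)]

lemma toDigitsCore_eq (f : Nat) : ∀ (m : Nat) (l : List Char), m < f →
    Nat.toDigitsCore 10 f m l = (digR m).reverse ++ l := by
  induction f with
  | zero => omega
  | succ f ih =>
    intro m l hm
    rw [Nat.toDigitsCore]
    by_cases h : m / 10 = 0
    · have hlt : m < 10 := by omega
      rw [if_pos h, digR_lt hlt, Nat.mod_eq_of_lt hlt]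
      simp
    · rw [if_neg h, ih (m / 10) _ (by omega), digR_ge (show (10:Nat) ≤ m by omega)]
      simp

lemma toChars_eq (m : Nat) : PySem.Int.toChars (m : Int) = (digR m).reverse := by
  unfold PySem.Int.toChars
  rw [if_neg (by omega)]
  have h1 : ((m : Int)).toNat = m := rfl
  rw [h1]
  unfold Nat.toDigits
  rw [toDigitsCore_eq (m + 1) m [] (by omega)]
  simp

lemma digitChar_six {d : Nat} (h : d < 10) : (Nat.digitChar d = '6') ↔ d = 6 := by
  interval_cases d <;> decide

lemma pfx1 (m : Nat) : ['6'] <+: digR m ↔ m % 10 = 6 := by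
  by_cases h : m < 10
  · rw [digR_lt h, Nat.mod_eq_of_lt h, List.cons_prefix_cons]
    constructor
    · rintro ⟨hc, -⟩
      exact (digitChar_six h).mp hc.symm
    · intro hc
      exact ⟨((digitChar_six h).mpr hc).symm, by simp⟩
  · rw [digR_ge (by omega), List.cons_prefix_cons]
    constructor
    · rintro ⟨hc, -⟩
      exact (digitChar_six (Nat.mod_lt m (by omega))).mp hc.symm
    · intro hc
      exact ⟨((digitChar_six (Nat.mod_lt m (by omega))).mpr hc).symm, by simp⟩

lemma six_eq {d : Nat} (h : d < 10) : ('6' = Nat.digitChar d) ↔ d = 6 := by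
  rw [eq_comm]
  exact digitChar_six h

lemma pfx2 (m : Nat) : ['6', '6'] <+: digR m ↔ m % 100 = 66 := by
  by_cases h : m < 10
  · rw [digR_lt h]
    constructor
    · intro hpre
      have := hpre.length_le
      simp at this
    · intro hc
      omega
  · rw [digR_ge (by omega), List.cons_prefix_cons, six_eq (Nat.mod_lt m (by omega)), pfx1 (m / 10)]
    omega

lemma infix_digR (m : Nat) : ['6', '6', '6'] <:+: digR m ↔ paN m = true := by
  induction m using Nat.strong_induction_on with
  | _ m ih =>
  by_cases h : m < 10
  · rw [digR_lt h, paN_lt (show m < 666 by omega)]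
    constructor
    · intro hp
      rcases List.infix_cons_iff.mp hp with hp | hp
      · have := hp.length_le
        simp at this
      · simp at hp
    · intro hf
      simp at hf
  · rw [digR_ge (by omega), List.infix_cons_iff]
    have hpre : (['6', '6', '6'] <+: Nat.digitChar (m % 10) :: digR (m / 10))
        ↔ (m % 10 = 6 ∧ (m / 10) % 100 = 66) := by
      rw [List.cons_prefix_cons, six_eq (Nat.mod_lt m (by omega)), pfx2 (m / 10)]
    rw [hpre, ih (m / 10) (by omega)]
    by_cases hm : m < 666
    · rw [paN_lt hm, paN_lt (show m / 10 < 666 by omega)]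
      constructor
      · rintro (⟨h1, h2⟩ | h1)
        · omega
        · simp at h1
      · intro hf
        simp at hf
    · rw [paN_pos (m := m) (by omega)]
      simp only [Bool.or_eq_true, beq_iff_eq]
      have hk : (m % 10 = 6 ∧ (m / 10) % 100 = 66) ↔ m % 1000 = 666 := by omega
      rw [hk]

lemma bridge (X : Int) (h : 0 ≤ X) :
    PySem.Str.isIn "666" (PySem.Int.toStr X) = containsB X := by
  obtain ⟨m, rfl⟩ : ∃ m : Nat, X = (m : Int) := ⟨X.toNat, by omega⟩
  have hiff := PySem.Str.isIn_iff_infix "666" (PySem.Int.toStr (m : Int))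
  rw [PySem.Int.toList_toStr, toChars_eq] at hiff
  have h666 : ("666").toList = ['6', '6', '6'] := rfl
  rw [h666] at hiff
  have hrev : (['6', '6', '6'] <:+: (digR m).reverse) ↔ (['6', '6', '6'] <:+: digR m) := by
    rw [show (['6', '6', '6'] : List Char) = (['6', '6', '6'] : List Char).reverse from rfl]
    exact List.reverse_infix
  rw [hrev, infix_digR] at hiff
  show _ = paN m
  cases hp : paN m
  · rw [hp] at hiff
    simp only [Bool.false_eq_true, iff_false] at hiff
    exact Bool.eq_false_iff.mpr (fun hh => hiff hh)
  · rw [hp] at hiff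
    simp only [iff_true] at hiff
    exact hiff

def SA' (X : Int) : Int := sumI paN (X + 1).toNat

def IsTgt (n T : Int) : Prop := n ≤ SA' T ∧ SA' (T - 1) < n

lemma iB_nonneg (b : Bool) : 0 ≤ iB b := by cases b <;> simp [iB]

lemma sumI_mono (p : Nat → Bool) {M N : Nat} (h : M ≤ N) : sumI p M ≤ sumI p N := by
  obtain ⟨K, rfl⟩ := Nat.exists_eq_add_of_le h
  rw [sumI_add]
  have hs : 0 ≤ ((List.range K).map (fun t => iB (p (M + t)))).sum := by
    refine List.sum_nonneg ?_
    intro x hx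
    simp only [List.mem_map] at hx
    obtain ⟨m, _, rfl⟩ := hx
    exact iB_nonneg _
  omega

lemma SA'_succ (X : Int) (h : -1 ≤ X) : SA' (X + 1) = SA' X + iB (containsB (X + 1)) := by
  unfold SA'
  have h1 : (X + 1 + 1).toNat = (X + 1).toNat + 1 := by omega
  rw [h1, sumI_succ]
  congr 2
  show containsB (((X + 1).toNat : Nat) : Int) = containsB (X + 1)
  congr 1
  omega

lemma SA'_mono {X Y : Int} (h : X ≤ Y) : SA' X ≤ SA' Y := by
  exact sumI_mono paN (by omega)

lemma SA'_small {X : Int} (h : X < 666) : SA' X = 0 := by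
  exact sumI_false _ (fun m hm => paN_lt (by omega))

lemma SA'_count (X : Int) (h : 0 ≤ X) : (countsB X).1 = SA' X := by
  have hX : X = ((X.toNat : Nat) : Int) := by omega
  rw [hX, countsB_correct X.toNat]
  unfold SA'
  have : (((X.toNat : Nat) : Int) + 1).toNat = X.toNat + 1 := by omega
  rw [this]

lemma contains_mul1000 (k : Int) (h : 0 ≤ k) : containsB (666 + 1000 * k) = true := by
  rw [containsB_pos (by omega)]
  have hm : PySem.Int.mod (666 + 1000 * k) 1000 = 666 := by
    rw [PySem.Int.mod_eq_emod_of_pos (by norm_num)]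
    omega
  rw [hm]
  simp

lemma SA'_lb (k : Nat) : (k : Int) + 1 ≤ SA' (666 + 1000 * (k : Int)) := by
  induction k with
  | zero =>
    have h0 : SA' 666 = SA' 665 + iB (containsB 666) := by
      have := SA'_succ 665 (by norm_num)
      norm_num at this ⊢
      exact this
    rw [show ((0:Nat):Int) + 1 = 1 by norm_num]
    norm_num
    rw [h0, SA'_small (by norm_num)]
    rw [show (666:Int) = 666 + 1000 * 0 by ring, contains_mul1000 0 (by norm_num)]
    simp [iB]
  | succ k ih =>
    have hM : (666 : Int) + 1000 * ((k:Int) + 1) - 1 + 1 = 666 + 1000 * ((k:Int) + 1) := by ring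
    have hstep := SA'_succ (666 + 1000 * ((k:Int) + 1) - 1) (by omega)
    rw [hM] at hstep
    have hc : containsB (666 + 1000 * ((k:Int) + 1)) = true := contains_mul1000 _ (by omega)
    rw [hc] at hstep
    have hmono : SA' (666 + 1000 * (k:Int)) ≤ SA' (666 + 1000 * ((k:Int) + 1) - 1) := SA'_mono (by omega)
    push_cast
    rw [hstep]
    simp only [iB, if_true]
    push_cast at ih
    omega

lemma SA'_big {n : Int} (h : 1 ≤ n) : n ≤ SA' (666 + 1000 * (n - 1)) := by
  have hk := SA'_lb (n - 1).toNat
  have hc : (((n - 1).toNat : Nat) : Int) = n - 1 := by omega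
  rw [hc] at hk
  omega

lemma exists_tgt {n : Int} (h : 1 ≤ n) : ∃ T, IsTgt n T := by
  have hex : ∃ X : Nat, n ≤ SA' (X : Int) := by
    refine ⟨(666 + 1000 * (n - 1)).toNat, ?_⟩
    have hc : (((666 + 1000 * (n - 1)).toNat : Nat) : Int) = 666 + 1000 * (n - 1) := by omega
    rw [hc]
    exact SA'_big h
  refine ⟨(Nat.find hex : Int), Nat.find_spec hex, ?_⟩
  rcases Nat.eq_zero_or_pos (Nat.find hex) with h0 | h0
  · rw [h0]
    norm_num
    rw [SA'_small (by norm_num)]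
    omega
  · have hmin := Nat.find_min hex (m := Nat.find hex - 1) (by omega)
    have hc : ((Nat.find hex : Int)) - 1 = (((Nat.find hex - 1 : Nat) : Nat) : Int) := by omega
    rw [hc]
    omega

lemma tgt_unique {n T T' : Int} (h : IsTgt n T) (h' : IsTgt n T') : T = T' := by
  rcases lt_trichotomy T T' with hlt | heq | hgt
  · have := SA'_mono (show T ≤ T' - 1 by omega)
    have h1 := h.1
    have h2 := h'.2
    omega
  · exact heq
  · have := SA'_mono (show T' ≤ T - 1 by omega)
    have h1 := h'.1
    have h2 := h.2
    omega

lemma loopA {n T : Int} (ht : IsTgt n T) : ∀ (fuel : Nat) (cnt num : Int),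
    665 ≤ num → num < T → cnt = SA' num → T ≤ num + fuel →
    apocStep n cnt num fuel = T := by
  intro fuel
  induction fuel with
  | zero =>
    intro cnt num h1 h2 h3 h4
    omega
  | succ fuel ih =>
    intro cnt num h1 h2 h3 h4
    rw [apocStep]
    have hb : PySem.Str.isIn "666" (PySem.Int.toStr (num + 1)) = containsB (num + 1) :=
      bridge _ (by omega)
    rw [hb]
    have hsucc : SA' (num + 1) = SA' num + iB (containsB (num + 1)) := SA'_succ num (by omega)
    cases hc : containsB (num + 1)
    · rw [if_neg (by simp)]
      have hval : SA' (num + 1) = cnt := by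
        rw [hsucc, hc]
        simp [iB, h3]
      have hne : num + 1 ≠ T := by
        intro he
        have hT1 := ht.1
        have hT2 := ht.2
        rw [← he] at hT1 hT2
        rw [hval] at hT1
        rw [show num + 1 - 1 = num by ring, ← h3] at hT2
        omega
      exact ih cnt (num + 1) (by omega) (by omega) hval.symm (by omega)
    · rw [if_pos (by simp)]
      have hval : SA' (num + 1) = cnt + 1 := by
        rw [hsucc, hc]
        simp [iB, h3]
      by_cases hbeq : cnt + 1 = n
      · rw [if_pos (by simp [hbeq])]
        by_contra hne
        have hlt : num + 1 < T := by
          rcases lt_or_eq_of_le (show num + 1 ≤ T by omega) with hh | hh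
          · exact hh
          · exact absurd hh hne
        have := SA'_mono (show num + 1 ≤ T - 1 by omega)
        have hT2 := ht.2
        omega
      · rw [if_neg (by simp [hbeq])]
        have hlt : num + 1 < T := by
          rcases lt_or_eq_of_le (show num + 1 ≤ T by omega) with hh | hh
          · exact hh
          · exfalso
            have hT1 := ht.1
            have hT2 := ht.2
            rw [← hh] at hT1 hT2
            rw [show num + 1 - 1 = num by ring, ← h3] at hT2
            rw [hval] at hT1
            omega
        exact ih (cnt + 1) (num + 1) (by omega) hlt hval.symm (by omega)

lemma tgt_le {n T : Int} (hn : 1 ≤ n) (ht : IsTgt n T) : T ≤ 666 + 1000 * (n - 1) := by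
  by_contra hgt
  have := SA'_mono (show 666 + 1000 * (n - 1) ≤ T - 1 by omega)
  have hB := SA'_big hn
  have hT2 := ht.2
  omega

lemma A_eq_tgt {n T : Int} (hn : 1 ≤ n) (ht : IsTgt n T) : apocalyptic_number n = T := by
  have hT666 : 666 ≤ T := by
    by_contra hh
    have := SA'_small (show T < 666 by omega)
    have hT1 := ht.1
    omega
  have hnn : ((n.toNat : Nat) : Int) = n := by omega
  refine loopA ht (1000 * n.toNat) 0 665 (by omega) (by omega) ?_ ?_
  · rw [SA'_small (by norm_num)]
  · have hb := tgt_le hn ht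
    have : ((1000 * n.toNat : Nat) : Int) = 1000 * n := by push_cast; omega
    omega

lemma tgt_end {n T : Int} (ht : IsTgt n T) {lo hi : Int} (hlh : ¬ lo + 1 < hi)
    (h2 : lo < hi) (h3 : SA' lo < n) (h4 : n ≤ SA' hi) : hi = T := by
  have htgt : IsTgt n hi := by
    refine ⟨h4, ?_⟩
    rw [show hi - 1 = lo by omega]
    exact h3
  exact (tgt_unique ht htgt).symm

lemma loopB {n T : Int} (ht : IsTgt n T) : ∀ (k : Nat) (lo hi : Int),
    (hi - lo).toNat ≤ k + 1 → 665 ≤ lo → lo < hi → SA' lo < n → n ≤ SA' hi →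
    bsearchLoop n k lo hi = T := by
  intro k
  induction k with
  | zero =>
    intro lo hi hk h1 h2 h3 h4
    rw [bsearchLoop]
    exact tgt_end ht (by omega) h2 h3 h4
  | succ k ih =>
    intro lo hi hk h1 h2 h3 h4
    rw [bsearchLoop]
    by_cases hlh : lo + 1 < hi
    · rw [if_pos hlh]
      have hgap1 := pvTermMid1 lo hi hlh
      have hgap2 := pvTermMid2 lo hi hlh
      have hmid1 : lo + 1 ≤ PySem.Int.floordiv (lo + hi) 2 := by
        rw [PySem.Int.le_floordiv_iff_mul_le (by norm_num)]
        omega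
      have hmid2 : PySem.Int.floordiv (lo + hi) 2 < hi := by
        rw [PySem.Int.floordiv_lt_iff_lt_mul (by norm_num)]
        omega
      have hcnt : (countsB (PySem.Int.floordiv (lo + hi) 2)).1
          = SA' (PySem.Int.floordiv (lo + hi) 2) := SA'_count _ (by omega)
      simp only [hcnt]
      by_cases hge : n ≤ SA' (PySem.Int.floordiv (lo + hi) 2)
      · rw [if_pos hge]
        exact ih lo _ (by omega) h1 (by omega) h3 hge
      · rw [if_neg hge]
        exact ih _ hi (by omega) (by omega) (by omega) (by omega) h4
    · rw [if_neg hlh]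
      exact tgt_end ht hlh h2 h3 h4

lemma B_eq_tgt {n T : Int} (hn : 1 ≤ n) (ht : IsTgt n T) : apocalyptic_number_alt n = T := by
  unfold apocalyptic_number_alt bsearchB
  refine loopB ht (666 + 1000 * (n - 1) - 665).toNat 665 (666 + 1000 * (n - 1))
    (by omega) (by omega) (by omega) ?_ (SA'_big hn)
  rw [SA'_small (by norm_num)]
  omega

-- ===== VERDICT (by name: the statement is the Claim_ definition above) =====
theorem apocalyptic_number_spec : Claim_equal_apocalyptic_number := by
  intro n _ hpre
  obtain ⟨T, hT⟩ := exists_tgt hpre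
  unfold Spec_apocalyptic_number
  rw [A_eq_tgt hpre hT, B_eq_tgt hpre hT]
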